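-- pv_equiv track=rewrite | github.com/jcolinpatrick/kryptos | scripts/e_chart_05_antipodes_misspelling.py | apply_misspelling_swaps
-- ===== SOURCE A (Python) =====
-- MISSPELLING_PAIRS = [
--     ('S', 'C'),  # PALIMPCEST (C instead of S)
--     ('L', 'Q'),  # IQLUSION   (Q instead of L)
--     ('E', 'A'),  # DESPARATLY (A instead of E)
--     ('I', 'E'),  # DIGETAL    (E instead of I)
-- ]
--
-- def swap_rows(tableau, a_char, b_char, alphabet):
--     """Swap two rows in the tableau (rows indexed by alphabet position of char)."""
--     idx = {c: i for i, c in enumerate(alphabet)}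
--     ra, rb = idx[a_char], idx[b_char]
--     t = [row[:] for row in tableau]
--     t[ra], t[rb] = t[rb], t[ra]
--     return t
--
-- def swap_cols(tableau, a_char, b_char, alphabet):
--     """Swap two columns in the tableau."""
--     idx = {c: i for i, c in enumerate(alphabet)}
--     ca, cb = idx[a_char], idx[b_char]
--     t = [row[:] for row in tableau]
--     for row in t:
--         row[ca], row[cb] = row[cb], row[ca]
--     return t
--
-- def apply_misspelling_swaps(tableau, alphabet, mode):
--     """Apply misspelling-derived swaps.
--     mode: 'rows', 'cols', 'both'
--     """
--     t = [row[:] for row in tableau]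
--     for wrong, right in MISSPELLING_PAIRS:
--         if mode in ('rows', 'both'):
--             t = swap_rows(t, wrong, right, alphabet)
--         if mode in ('cols', 'both'):
--             t = swap_cols(t, wrong, right, alphabet)
--     return t
-- ===== SOURCE B (Python) =====
-- MISSPELLING_PAIRS = [
--     ('S', 'C'),  # PALIMPCEST (C instead of S)
--     ('L', 'Q'),  # IQLUSION   (Q instead of L)
--     ('E', 'A'),  # DESPARATLY (A instead of E)
--     ('I', 'E'),  # DIGETAL    (E instead of I)
-- ]
--
-- def apply_misspelling_swaps(tableau, alphabet, mode):
--     """Apply misspelling-derived swaps via permutation tables in one output pass."""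
--     do_rows = mode in ('rows', 'both')
--     do_cols = mode in ('cols', 'both')
--     if do_rows or do_cols:
--         idx = {c: i for i, c in enumerate(alphabet)}
--         pairs = [(idx[w], idx[r]) for w, r in MISSPELLING_PAIRS]
--     else:
--         pairs = []
--     rowperm = list(range(len(tableau)))
--     if do_rows:
--         for a, b in pairs:
--             rowperm[a], rowperm[b] = rowperm[b], rowperm[a]
--     result = []
--     for i in rowperm:
--         row = tableau[i]
--         if do_cols:
--             cperm = list(range(len(row)))
--             for a, b in pairs:
--                 cperm[a], cperm[b] = cperm[b], cperm[a]
--             result.append([row[j] for j in cperm])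
--         else:
--             result.append(row[:])
--     return result
-- ===== Notes on version B (the rewrite author's own statement) =====
-- stated objective: alternative
-- what changed: Instead of re-copying the whole tableau and rebuilding the alphabet-index dict for every one of the four swaps, B builds the index dict once, composes the four pair swaps into a row-permutation table and a column-permutation table, and materializes the output in a single pass result[i] = [tableau[rowperm[i]][cperm[j]] for j]; same asymptotic cost, measured about equal.
import Mathlib
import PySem

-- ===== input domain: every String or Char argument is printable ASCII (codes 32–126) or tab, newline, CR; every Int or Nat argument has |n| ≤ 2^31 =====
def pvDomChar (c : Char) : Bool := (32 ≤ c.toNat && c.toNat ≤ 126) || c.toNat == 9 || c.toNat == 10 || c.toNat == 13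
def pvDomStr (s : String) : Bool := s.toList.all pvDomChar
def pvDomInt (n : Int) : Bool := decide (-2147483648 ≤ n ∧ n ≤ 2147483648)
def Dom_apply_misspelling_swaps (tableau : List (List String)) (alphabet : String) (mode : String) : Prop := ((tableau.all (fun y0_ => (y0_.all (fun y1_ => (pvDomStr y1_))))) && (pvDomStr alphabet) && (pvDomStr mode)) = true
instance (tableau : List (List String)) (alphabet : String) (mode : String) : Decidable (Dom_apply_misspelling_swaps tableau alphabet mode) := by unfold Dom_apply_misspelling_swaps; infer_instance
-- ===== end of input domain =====

-- B replaces A's four copy-and-swap passes (each rebuilding the alphabet dict) by one dict,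
-- two composed permutation tables and a single output pass (objective: alternative algorithm).

-- ===== PORT A =====
def pvMISSPELLING_PAIRS : List (Char × Char) := [('S','C'),('L','Q'),('E','A'),('I','E')]

-- shared primitive: the Python simultaneous swap `l[i], l[j] = l[j], l[i]`;
-- Python raises IndexError when an index is out of range — those inputs are excluded by Pre_.
def pvSwapAt {α : Type} (l : List α) (i j : Nat) : List α :=
  match l[i]?, l[j]? with
  | some x, some y => (l.set i y).set j x
  | _, _ => l

-- `idx = {c: i for i, c in enumerate(alphabet)}` (last occurrence wins, as in Python)
def pvIdxDict (alphabet : String) : PySem.Dict Char Int :=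
  (PySem.List.enumerate alphabet.toList 0).foldl (fun d ic => d.insert ic.2 ic.1) PySem.Dict.empty

-- `idx[c]`; Python raises KeyError when c is missing — excluded by Pre_, default 0 is never used there.
def pvLook (alphabet : String) (c : Char) : Nat :=
  (((pvIdxDict alphabet).get? c).getD 0).toNat

def pvSwapRowsA (t : List (List String)) (a b : Char) (alphabet : String) : List (List String) :=
  pvSwapAt t (pvLook alphabet a) (pvLook alphabet b)

def pvSwapColsA (t : List (List String)) (a b : Char) (alphabet : String) : List (List String) :=
  t.map (fun row => pvSwapAt row (pvLook alphabet a) (pvLook alphabet b))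

def apply_misspelling_swaps (tableau : List (List String)) (alphabet : String) (mode : String) : List (List String) :=
  pvMISSPELLING_PAIRS.foldl (fun t wr =>
    let t1 := if mode == "rows" || mode == "both" then pvSwapRowsA t wr.1 wr.2 alphabet else t
    if mode == "cols" || mode == "both" then pvSwapColsA t1 wr.1 wr.2 alphabet else t1) tableau

-- ===== PORT B =====
def apply_misspelling_swaps_alt (tableau : List (List String)) (alphabet : String) (mode : String) : List (List String) :=
  let doRows := mode == "rows" || mode == "both"
  let doCols := mode == "cols" || mode == "both"
  let pairs : List (Nat × Nat) :=
    if doRows || doCols then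
      let idx := pvIdxDict alphabet
      pvMISSPELLING_PAIRS.map (fun wr => (((idx.get? wr.1).getD 0).toNat, ((idx.get? wr.2).getD 0).toNat))
    else []
  let rowperm : List Nat :=
    if doRows then pairs.foldl (fun rp q => pvSwapAt rp q.1 q.2) (List.range tableau.length)
    else List.range tableau.length
  rowperm.map (fun i =>
    let row := tableau.getD i []
    if doCols then
      (pairs.foldl (fun cp q => pvSwapAt cp q.1 q.2) (List.range row.length)).map (fun j => row.getD j "")
    else row)

-- ===== PRECONDITION & SPEC =====
-- last-occurrence index of c in s, exactly the value `{c: i for i, c in enumerate(s)}[c]` in Python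
def pvCharIdx : List Char → Char → Option Nat
  | [], _ => none
  | a :: rest, c =>
      match pvCharIdx rest c with
      | some k => some (k + 1)
      | none => if a = c then some 0 else none

-- Pre_ excludes exactly the inputs where the Python A raises: KeyError when a swap character is
-- missing from alphabet (under a swapping mode), IndexError when a swap index reaches past the
-- tableau height (row modes) or past some row's length (column modes).
def Pre_apply_misspelling_swaps (tableau : List (List String)) (alphabet : String) (mode : String) : Prop :=
  ((!(mode == "rows" || mode == "cols" || mode == "both")) ||
    (['S','C','L','Q','E','A','I'].all (fun c =>
      (pvCharIdx alphabet.toList c).isSome &&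
      (!(mode == "rows" || mode == "both") ||
        decide ((pvCharIdx alphabet.toList c).getD 0 < tableau.length)) &&
      (!(mode == "cols" || mode == "both") ||
        tableau.all (fun row => decide ((pvCharIdx alphabet.toList c).getD 0 < row.length)))))) = true
instance (tableau : List (List String)) (alphabet : String) (mode : String) : Decidable (Pre_apply_misspelling_swaps tableau alphabet mode) := by unfold Pre_apply_misspelling_swaps; infer_instance

def pvWitness_apply_misspelling_swaps : List (List String) × String × String :=
  ([["a"],["b"],["c"],["d"],["e"],["f"],["g"]], "SCLQEAI", "rows")

def Spec_apply_misspelling_swaps (tableau : List (List String)) (alphabet : String) (mode : String) (out : List (List String)) : Prop := out = apply_misspelling_swaps_alt tableau alphabet mode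
instance (tableau : List (List String)) (alphabet : String) (mode : String) (out : List (List String)) : Decidable (Spec_apply_misspelling_swaps tableau alphabet mode out) := by unfold Spec_apply_misspelling_swaps; infer_instance

-- ===== CLAIM (what is proved, stated in full; the proofs are below) =====
def Claim_equal_apply_misspelling_swaps : Prop := ∀ (tableau : List (List String)) (alphabet : String) (mode : String), Dom_apply_misspelling_swaps tableau alphabet mode → Pre_apply_misspelling_swaps tableau alphabet mode → Spec_apply_misspelling_swaps tableau alphabet mode (apply_misspelling_swaps tableau alphabet mode)

-- ===== LEMMAS AND PROOFS =====

theorem pvSwapAt_map {α β : Type} (f : α → β) (l : List α) (i j : Nat) :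
    pvSwapAt (l.map f) i j = (pvSwapAt l i j).map f := by
  cases hi : l[i]? <;> cases hj : l[j]? <;>
    simp [pvSwapAt, List.getElem?_map, hi, hj, List.map_set]

theorem pvFoldl_swap_map {α β : Type} (f : α → β) (qs : List (Nat × Nat)) (l : List α) :
    qs.foldl (fun p q => pvSwapAt p q.1 q.2) (l.map f)
      = (qs.foldl (fun p q => pvSwapAt p q.1 q.2) l).map f := by
  induction qs generalizing l with
  | nil => rfl
  | cons q rest ih => simp only [List.foldl_cons, pvSwapAt_map, ih]

theorem pvMap_getD_range {α : Type} (l : List α) (d : α) :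
    (List.range l.length).map (fun i => l.getD i d) = l := by
  apply List.ext_getElem
  · simp
  · intro i h1 h2
    simp [List.getD, List.getElem?_eq_getElem h2]

-- one output pass over swapped identity indices equals the fold of swaps on the list itself
theorem pvPerm_view {α : Type} (qs : List (Nat × Nat)) (l : List α) (d : α) :
    (qs.foldl (fun p q => pvSwapAt p q.1 q.2) (List.range l.length)).map (fun i => l.getD i d)
      = qs.foldl (fun p q => pvSwapAt p q.1 q.2) l := by
  rw [← pvFoldl_swap_map (fun i => l.getD i d) qs (List.range l.length), pvMap_getD_range]

theorem pvFoldl_map_lift {β γ : Type} (g : γ → β → β) (qs : List γ) (t : List β) :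
    qs.foldl (fun tt q => tt.map (g q)) t = t.map (fun r => qs.foldl (fun r q => g q r) r) := by
  induction qs generalizing t with
  | nil => simp
  | cons q rest ih => simp [ih, List.map_map, Function.comp_def]

-- interleaved row-swap-then-column-swap equals all row swaps then all column swaps
theorem pvBoth_split (qs : List (Nat × Nat)) (t : List (List String)) :
    qs.foldl (fun tt q => (pvSwapAt tt q.1 q.2).map (fun row => pvSwapAt row q.1 q.2)) t
      = (qs.foldl (fun p q => pvSwapAt p q.1 q.2) t).map
          (fun row => qs.foldl (fun r q => pvSwapAt r q.1 q.2) row) := by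
  induction qs generalizing t with
  | nil => simp
  | cons q rest ih =>
      simp only [List.foldl_cons, ih, pvFoldl_swap_map, List.map_map, Function.comp_def]

theorem pvColView (qs : List (Nat × Nat)) (t : List (List String)) :
    (List.range t.length).map (fun i =>
        (qs.foldl (fun cp q => pvSwapAt cp q.1 q.2) (List.range (t.getD i []).length)).map
          (fun j => (t.getD i []).getD j ""))
      = t.map (fun row => qs.foldl (fun r q => pvSwapAt r q.1 q.2) row) := by
  simp only [pvPerm_view]
  calc (List.range t.length).map (fun i => qs.foldl (fun r q => pvSwapAt r q.1 q.2) (t.getD i []))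
      = ((List.range t.length).map (fun i => t.getD i [])).map
          (fun row => qs.foldl (fun r q => pvSwapAt r q.1 q.2) row) := by
        rw [List.map_map]; rfl
    _ = t.map (fun row => qs.foldl (fun r q => pvSwapAt r q.1 q.2) row) := by
        rw [pvMap_getD_range]

theorem pvPermColView (qs : List (Nat × Nat)) (t : List (List String)) :
    (qs.foldl (fun rp q => pvSwapAt rp q.1 q.2) (List.range t.length)).map (fun i =>
        (qs.foldl (fun cp q => pvSwapAt cp q.1 q.2) (List.range (t.getD i []).length)).map
          (fun j => (t.getD i []).getD j ""))
      = (qs.foldl (fun p q => pvSwapAt p q.1 q.2) t).map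
          (fun row => qs.foldl (fun r q => pvSwapAt r q.1 q.2) row) := by
  simp only [pvPerm_view]
  rw [← pvPerm_view qs t [], List.map_map]
  rfl

-- the generic core: A's interleaved fold equals B's permutation-table pass, for any flags and pairs
theorem pvCore (qs : List (Nat × Nat)) (b1 b2 : Bool) (t : List (List String)) :
    qs.foldl (fun tt q =>
        let t1 := if b1 then pvSwapAt tt q.1 q.2 else tt
        if b2 then t1.map (fun row => pvSwapAt row q.1 q.2) else t1) t
      = (if b1 then qs.foldl (fun rp q => pvSwapAt rp q.1 q.2) (List.range t.length)
         else List.range t.length).map (fun i =>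
          let row := t.getD i []
          if b2 then
            (qs.foldl (fun cp q => pvSwapAt cp q.1 q.2) (List.range row.length)).map
              (fun j => row.getD j "")
          else row) := by
  cases b1 <;> cases b2 <;> simp only [if_true, if_false, Bool.false_eq_true]
  · -- no swaps at all
    simp
    exact (pvMap_getD_range t []).symm
  · -- cols only
    rw [pvFoldl_map_lift (fun q r => pvSwapAt r q.1 q.2) qs t]
    exact (pvColView qs t).symm
  · -- rows only
    exact (pvPerm_view qs t []).symm
  · -- both
    rw [pvBoth_split qs t]
    exact (pvPermColView qs t).symm

-- ===== VERDICT (by name: the statement is the Claim_ definition above) =====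
theorem apply_misspelling_swaps_spec : Claim_equal_apply_misspelling_swaps := by
  intro tableau alphabet mode _ _
  unfold Spec_apply_misspelling_swaps apply_misspelling_swaps apply_misspelling_swaps_alt
  by_cases hb : ((mode == "rows" || mode == "both") || (mode == "cols" || mode == "both")) = true
  · have key := pvCore
      (pvMISSPELLING_PAIRS.map (fun wr => (pvLook alphabet wr.1, pvLook alphabet wr.2)))
      (mode == "rows" || mode == "both") (mode == "cols" || mode == "both") tableau
    simp only [List.foldl_map] at key
    simp only [hb, if_true, List.foldl_map, pvSwapRowsA, pvSwapColsA, pvLook]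
    simpa [pvSwapRowsA, pvSwapColsA, pvLook] using key
  · have h1 : (mode == "rows" || mode == "both") = false := by
      cases hr : (mode == "rows" || mode == "both") <;> simp_all
    have h2 : (mode == "cols" || mode == "both") = false := by
      cases hc : (mode == "cols" || mode == "both") <;> simp_all
    simp only [h1, h2, Bool.or_self, Bool.false_eq_true, if_false]
    simp
    exact (pvMap_getD_range tableau []).symm
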